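-- pv_equiv track=rewrite | github.com/bpemble/corsair | scripts/cut_over_preflight.py | _trim_subsec
-- ===== SOURCE A (Python) =====
-- def _trim_subsec(ts: str) -> str:
--     """Drop fractional-second digits past 6 so py3.10 fromisoformat parses
--     Rust nanosecond timestamps."""
--     if "." not in ts:
--         return ts
--     head, _, tail = ts.partition(".")
--     # tail is e.g. "963343572+00:00" — split fraction from offset
--     frac = ""
--     rest = tail
--     for i, c in enumerate(tail):
--         if not c.isdigit():
--             frac = tail[:i]
--             rest = tail[i:]
--             break
--     else:
--         frac = tail
--         rest = ""
--     return f"{head}.{frac[:6]}{rest}"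
-- ===== SOURCE B (Python) =====
-- def _trim_subsec(ts: str) -> str:
--     """Drop fractional-second digits past 6 so py3.10 fromisoformat parses
--     Rust nanosecond timestamps."""
--     out = []
--     state = 0  # 0 = before first dot, 1 = in fraction, 2 = past fraction
--     count = 0
--     for c in ts:
--         if state == 0:
--             out.append(c)
--             if c == ".":
--                 state = 1
--         elif state == 1:
--             if c.isdigit():
--                 count += 1
--                 if count <= 6:
--                     out.append(c)
--             else:
--                 state = 2
--                 out.append(c)
--         else:
--             out.append(c)
--     return "".join(out)
-- ===== Notes on version B (the rewrite author's own statement) =====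
-- stated objective: alternative
-- what changed: Replaces partition into head/tail plus an enumerate/break scan and an f-string slice rebuild by a single left-to-right pass: a three-state character machine (before dot / in fraction / past fraction) that emits the output char by char, counting fraction digits and dropping those past the sixth.
import Mathlib
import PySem

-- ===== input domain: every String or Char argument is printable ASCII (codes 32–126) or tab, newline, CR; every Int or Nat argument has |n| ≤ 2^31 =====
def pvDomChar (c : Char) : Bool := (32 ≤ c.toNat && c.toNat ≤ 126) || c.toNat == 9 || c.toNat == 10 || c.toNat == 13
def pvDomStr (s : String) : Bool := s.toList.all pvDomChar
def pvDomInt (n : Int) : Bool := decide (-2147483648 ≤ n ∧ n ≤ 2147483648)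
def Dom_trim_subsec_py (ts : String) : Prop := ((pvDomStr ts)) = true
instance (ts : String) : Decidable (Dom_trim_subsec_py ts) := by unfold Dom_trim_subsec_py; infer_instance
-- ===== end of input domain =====

-- B replaces A's partition + enumerate/break scan + slice rebuild by a single left-to-right pass:
-- a three-state character machine (before dot / in fraction / past fraction) that emits the output
-- char by char, dropping fraction digits past the sixth; objective: alternative (same O(n) cost).

-- ===== PORT A =====
-- ts.partition("."): chars before the first '.', chars after it ((s, []) when '.' is absent)
def pvPartA : List Char → List Char × List Char
  | [] => ([], [])
  | c :: rest =>
      if c = '.' then ([], rest)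
      else
        let p := pvPartA rest
        (c :: p.1, p.2)

-- the 'for i, c in enumerate(tail): … break / else' loop, returning (frac, rest)
def pvLoopA (tail : List Char) : List (Int × Char) → List Char × List Char
  | [] => (tail, [])
  | (i, c) :: rest =>
      if ¬ (PySem.Chars.isdigit c = true) then
        (PySem.List.slice tail none (some i), PySem.List.slice tail (some i) none)
      else pvLoopA tail rest

def trim_subsec_py (ts : String) : String :=
  if ¬ (PySem.Str.isIn "." ts = true) then ts
  else
    let p := pvPartA ts.toList
    let fr := pvLoopA p.2 (PySem.List.enumerate p.2 0)
    String.ofList (p.1 ++ '.' :: (PySem.List.slice fr.1 none (some 6) ++ fr.2))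

-- ===== PORT B =====
-- one step of the state machine: state 0 = before first dot, 1 = in fraction, 2 = past fraction
def pvStepB (st : Nat × Nat × List Char) (c : Char) : Nat × Nat × List Char :=
  if st.1 = 0 then
    (if c = '.' then 1 else 0, st.2.1, st.2.2 ++ [c])
  else if st.1 = 1 then
    if PySem.Chars.isdigit c then
      (1, st.2.1 + 1, if st.2.1 + 1 ≤ 6 then st.2.2 ++ [c] else st.2.2)
    else (2, st.2.1, st.2.2 ++ [c])
  else (st.1, st.2.1, st.2.2 ++ [c])

def trim_subsec_py_alt (ts : String) : String :=
  String.ofList (ts.toList.foldl pvStepB (0, 0, [])).2.2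

-- ===== PRECONDITION & SPEC =====
def Spec_trim_subsec_py (ts : String) (out : String) : Prop := out = trim_subsec_py_alt ts
instance (ts : String) (out : String) : Decidable (Spec_trim_subsec_py ts out) := by unfold Spec_trim_subsec_py; infer_instance

-- ===== CLAIM (what is proved, stated in full; the proofs are below) =====
def Claim_equal_trim_subsec_py : Prop := ∀ (ts : String), Dom_trim_subsec_py ts → Spec_trim_subsec_py ts (trim_subsec_py ts)

-- ===== LEMMAS AND PROOFS =====

-- proof-side helper: the index just past the digit run of s starting at j
def pvScan (s : List Char) (j : Nat) : Nat :=
  if h : j < s.length then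
    if PySem.Chars.isdigit s[j] then pvScan s (j + 1) else j
  else j
termination_by s.length - j

theorem pvExists_split (s : List Char) (hs : '.' ∈ s) :
    ∃ h t, '.' ∉ h ∧ s = h ++ '.' :: t := by
  induction s with
  | nil => cases hs
  | cons c rest ih =>
      by_cases hc : c = '.'
      · exact ⟨[], rest, by simp, by simp [hc]⟩
      · have : '.' ∈ rest := by
          cases hs with
          | head => exact absurd rfl hc
          | tail _ h => exact h
        obtain ⟨h, t, hn, rfl⟩ := ih this
        refine ⟨c :: h, t, ?_, rfl⟩
        simp only [List.mem_cons, not_or]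
        exact ⟨fun e => hc e.symm, hn⟩

theorem pvPartA_eq (h t : List Char) (hn : '.' ∉ h) :
    pvPartA (h ++ '.' :: t) = (h, t) := by
  induction h with
  | nil => simp [pvPartA]
  | cons c rest ih =>
      have hc : c ≠ '.' := fun e => hn (e ▸ List.mem_cons_self)
      have hr : '.' ∉ rest := fun m => hn (List.mem_cons_of_mem _ m)
      simp [pvPartA, hc, ih hr]

-- A's enumerate loop computes the (take, drop) at the digit-scan index
theorem pvLoopA_eq (t : List Char) : ∀ (rem : List Char) (k : Nat), rem = t.drop k →
    pvLoopA t (PySem.List.enumerate rem (k : Int)) =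
      (t.take (pvScan t k), t.drop (pvScan t k)) := by
  intro rem
  induction rem with
  | nil =>
      intro k hk
      have hlen : t.length ≤ k := by
        by_contra hlt
        rw [eq_comm, List.drop_eq_nil_iff] at hk
        omega
      have hscan : pvScan t k = k := by
        rw [pvScan, dif_neg (by omega)]
      rw [hscan]
      simp [pvLoopA, PySem.List.enumerate, List.take_of_length_le hlen,
        List.drop_of_length_le hlen]
  | cons c rest ih =>
      intro k hk
      have hklen : k < t.length := by
        by_contra hge
        rw [List.drop_of_length_le (by omega)] at hk
        simp at hk
      rw [List.drop_eq_getElem_cons hklen] at hk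
      injection hk with hck hrest
      subst hck
      rw [PySem.List.enumerate_cons, pvLoopA]
      by_cases hd : PySem.Chars.isdigit (t[k]'hklen) = true
      · rw [if_neg (not_not_intro hd),
          show ((k : Int) + 1) = ((k + 1 : Nat) : Int) by push_cast; ring,
          ih (k + 1) hrest,
          show pvScan t k = pvScan t (k + 1) by
            rw [pvScan, dif_pos hklen, if_pos hd]]
      · have hsl1 : PySem.List.slice t none (some ((k : Nat) : Int)) = t.take (((k : Nat) : Int)).toNat :=
          PySem.List.slice_to _ (by positivity)
        have hsl2 : PySem.List.slice t (some ((k : Nat) : Int)) none = t.drop (((k : Nat) : Int)).toNat :=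
          PySem.List.slice_from _ (by positivity)
        rw [if_pos hd,
          show pvScan t k = k from by rw [pvScan, dif_pos hklen, if_neg hd],
          hsl1, hsl2]
        simp

-- the scan index from 0 is the length of the digit prefix
theorem pvScan_takeWhile (t : List Char) :
    pvScan t 0 = (t.takeWhile (fun c => PySem.Chars.isdigit c)).length := by
  suffices h : ∀ (s : List Char) (u : List Char) (k : Nat), s = u ++ t → k = u.length →
      pvScan s k = u.length + (t.takeWhile (fun c => PySem.Chars.isdigit c)).length by
    simpa using h t [] 0 rfl rfl
  intro s
  induction t with
  | nil =>
      intro u k hs hk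
      subst hs hk
      rw [pvScan, dif_neg (by simp)]
      simp [List.takeWhile]
  | cons c rest ih =>
      intro u k hs hk
      subst hs hk
      have hlen : u.length < (u ++ c :: rest).length := by simp
      have hg : (u ++ c :: rest)[u.length]'hlen = c := by
        rw [List.getElem_append_right (le_refl _)]
        simp
      by_cases hd : PySem.Chars.isdigit c = true
      · rw [pvScan, dif_pos hlen, hg, if_pos hd]
        have := ih (u ++ [c]) (u.length + 1) (by simp) (by simp)
        rw [this]
        simp [List.takeWhile, hd]
        omega
      · rw [pvScan, dif_pos hlen, hg, if_neg hd]
        simp [List.takeWhile, hd]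

-- B's machine in state 0 copies a dot-free block
theorem pvFold0 (h : List Char) (hn : '.' ∉ h) (cnt : Nat) (acc : List Char) :
    h.foldl pvStepB (0, cnt, acc) = (0, cnt, acc ++ h) := by
  induction h generalizing acc with
  | nil => simp
  | cons c rest ih =>
      have hc : c ≠ '.' := fun e => hn (e ▸ List.mem_cons_self)
      have hr : '.' ∉ rest := fun m => hn (List.mem_cons_of_mem _ m)
      have hstep : pvStepB (0, cnt, acc) c = (0, cnt, acc ++ [c]) := by
        simp [pvStepB, hc]
      rw [List.foldl_cons, hstep, ih hr (acc ++ [c])]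
      simp

-- B's machine in state 2 copies everything
theorem pvFold2 (l : List Char) (cnt : Nat) (acc : List Char) :
    l.foldl pvStepB (2, cnt, acc) = (2, cnt, acc ++ l) := by
  induction l generalizing acc with
  | nil => simp
  | cons c rest ih =>
      have hstep : pvStepB (2, cnt, acc) c = (2, cnt, acc ++ [c]) := by
        simp [pvStepB]
      rw [List.foldl_cons, hstep, ih (acc ++ [c])]
      simp

-- B's machine in state 1 keeps at most (6 - cnt) digits of a digit block
theorem pvFold1_digits (d : List Char) (hd : ∀ c ∈ d, PySem.Chars.isdigit c = true)
    (rest : List Char) (cnt : Nat) (acc : List Char) :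
    (d ++ rest).foldl pvStepB (1, cnt, acc) =
      rest.foldl pvStepB (1, cnt + d.length, acc ++ d.take (6 - cnt)) := by
  induction d generalizing cnt acc with
  | nil => simp
  | cons c dr ih =>
      have hc : PySem.Chars.isdigit c = true := hd c List.mem_cons_self
      have hdr : ∀ x ∈ dr, PySem.Chars.isdigit x = true := fun x m => hd x (List.mem_cons_of_mem _ m)
      have hstep : pvStepB (1, cnt, acc) c =
          (1, cnt + 1, if cnt + 1 ≤ 6 then acc ++ [c] else acc) := by
        simp only [pvStepB]; norm_num [hc]
      rw [List.cons_append, List.foldl_cons, hstep, ih hdr (cnt + 1)]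
      by_cases h6 : cnt + 1 ≤ 6
      · rw [if_pos h6]
        have htk : (c :: dr).take (6 - cnt) = c :: dr.take (6 - (cnt + 1)) := by
          rw [show 6 - cnt = (6 - (cnt + 1)) + 1 by omega]
          simp
        congr 1
        simp only [Prod.mk.injEq, htk, List.length_cons]
        refine ⟨trivial, by omega, by simp⟩
      · rw [if_neg h6]
        congr 1
        simp only [Prod.mk.injEq, List.length_cons]
        refine ⟨trivial, by omega, ?_⟩
        rw [show 6 - cnt = 0 by omega, show 6 - (cnt + 1) = 0 by omega]
        simp

-- B's machine in state 1 on a block whose head is no digit: emit it all (via state 2)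
theorem pvFold1_rest (r : List Char) (hr : ∀ c, r.head? = some c → ¬ PySem.Chars.isdigit c = true)
    (cnt : Nat) (acc : List Char) :
    (r.foldl pvStepB (1, cnt, acc)).2.2 = acc ++ r := by
  cases r with
  | nil => simp
  | cons c r' =>
      have hc : ¬ PySem.Chars.isdigit c = true := hr c rfl
      have hstep : pvStepB (1, cnt, acc) c = (2, cnt, acc ++ [c]) := by
        simp only [pvStepB]; norm_num [hc]
      rw [List.foldl_cons, hstep, pvFold2 r' cnt (acc ++ [c])]
      simp

theorem pvMain (ts : String) : trim_subsec_py ts = trim_subsec_py_alt ts := by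
  by_cases hin : PySem.Str.isIn "." ts = true
  · -- '.' present
    have hinf : ['.'] <:+: ts.toList := by
      have := (PySem.Str.isIn_iff_infix (sub := ".") (s := ts)).mp hin
      simpa using this
    have hmem : '.' ∈ ts.toList := hinf.mem (by simp)
    obtain ⟨h, t, hn, hs⟩ := pvExists_split ts.toList hmem
    set d := t.takeWhile (fun c => PySem.Chars.isdigit c) with hd
    set r := t.dropWhile (fun c => PySem.Chars.isdigit c) with hr
    have htd : t = d ++ r := (List.takeWhile_append_dropWhile).symm
    have hdall : ∀ c ∈ d, PySem.Chars.isdigit c = true := fun c m => by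
      simpa using List.mem_takeWhile_imp m
    have hrhead : ∀ c, r.head? = some c → ¬ PySem.Chars.isdigit c = true := by
      intro c hc
      have := List.head?_dropWhile_not (p := fun c => PySem.Chars.isdigit c) (l := t)
      rw [← hr, hc] at this
      simpa using this
    -- A's side
    rw [trim_subsec_py, if_neg (not_not_intro hin), hs, pvPartA_eq h t hn]
    dsimp only
    have hloop := pvLoopA_eq t t 0 (by simp)
    simp only [Nat.cast_zero] at hloop
    rw [hloop, pvScan_takeWhile t]
    have htake : t.take d.length = d := by rw [htd, List.take_left]
    have hdrop : t.drop d.length = r := by rw [htd, List.drop_left]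
    rw [← hd, htake, hdrop,
      PySem.List.slice_to _ (by norm_num : (0:Int) ≤ 6)]
    -- B's side
    rw [trim_subsec_py_alt, hs, htd]
    have hfold0 := pvFold0 h hn 0 []
    rw [List.foldl_append, hfold0]
    have hdot : pvStepB (0, 0, ([] : List Char) ++ h) '.' = (1, 0, ([] ++ h) ++ ['.']) := by
      simp [pvStepB]
    have hfd := pvFold1_digits d hdall [] 0 ([] ++ h ++ ['.'])
    simp only [List.append_nil, List.foldl_nil, Nat.zero_add, Nat.sub_zero] at hfd
    rw [List.foldl_cons, hdot, List.foldl_append, hfd, pvFold1_rest r hrhead]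
    simp
  · -- no '.'
    have hnd : '.' ∉ ts.toList := by
      intro hmem
      obtain ⟨u, v, huv⟩ := List.append_of_mem hmem
      exact hin ((PySem.Str.isIn_iff_infix "." ts).mpr (by simp [huv]; exact ⟨u, v, by simp⟩))
    rw [trim_subsec_py, if_pos hin, trim_subsec_py_alt, pvFold0 ts.toList hnd 0 []]
    simp [String.ofList_toList]

-- ===== VERDICT (by name: the statement is the Claim_ definition above) =====
theorem trim_subsec_py_spec : Claim_equal_trim_subsec_py := by
  intro ts _
  unfold Spec_trim_subsec_py
  exact pvMain ts
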